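-- pv_equiv track=rewrite | github.com/paulkugener/adventofcode | 2016/07.py | check_part2
-- ===== SOURCE A (Python) =====
-- def check_part2(a):
--     outside = ''
--     inside = ''
--     for j in range(len(a)):
--         if j % 2 == 0:
--             outside += '.' + a[j]
--         else:
--             inside += ',' + a[j]
--
--     k = 0
--     while k < len(outside)-2:
--         if outside[k] == outside[k+2] and outside[k] != outside[k+1] and outside[k+1] != '.':
--             # ! you need to check for BAB, not ABA! :)
--             if ''.join([outside[k+1], outside[k], outside[k+1]]) in inside:
--                 return True
--         k += 1
--     return False
-- ===== SOURCE B (Python) =====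
-- def check_part2(a):
--     evens, odds = a[0::2], a[1::2]
--     outside = '.' + '.'.join(evens) if evens else ''
--     inside = ',' + ','.join(odds) if odds else ''
--     abas = {(outside[i], outside[i + 1]) for i in range(len(outside) - 2)
--             if outside[i] == outside[i + 2] and outside[i] != outside[i + 1]
--             and outside[i + 1] != '.'}
--     babs = {(inside[i + 1], inside[i]) for i in range(len(inside) - 2)
--             if inside[i] == inside[i + 2]}
--     return not abas.isdisjoint(babs)
-- ===== Notes on version B (the rewrite author's own statement) =====
-- stated objective: alternative
-- what changed: Replaces A's index-walking while-loop that runs a fresh substring search ('bab in inside') for every ABA hit by two independent trigram-pair extractions (ABA pairs from outside, flipped BAB pairs from inside) combined with a single set-intersection (isdisjoint) test.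
import Mathlib
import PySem

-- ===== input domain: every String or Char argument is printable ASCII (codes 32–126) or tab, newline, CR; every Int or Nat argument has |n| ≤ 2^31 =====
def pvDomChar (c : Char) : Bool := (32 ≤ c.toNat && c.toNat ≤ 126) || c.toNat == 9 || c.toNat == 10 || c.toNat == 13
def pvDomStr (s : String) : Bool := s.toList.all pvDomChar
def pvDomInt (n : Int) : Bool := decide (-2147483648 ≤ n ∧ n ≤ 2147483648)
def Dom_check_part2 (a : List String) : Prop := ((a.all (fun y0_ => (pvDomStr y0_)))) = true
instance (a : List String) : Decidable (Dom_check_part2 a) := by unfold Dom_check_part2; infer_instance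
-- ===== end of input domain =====

-- B replaces A's positional while-loop (which runs a substring search over inside for every ABA
-- hit) by two independent trigram-pair extractions — ABA pairs from outside, flipped BAB pairs
-- from inside — and a single set-intersection (isdisjoint) test.

-- ===== PORT A =====
-- A's while loop: 'while k < len(outside)-2' scanning outside[k..k+2]; the getD accesses are
-- exact because k+2 < outside.length inside the loop (default never read).
-- (fuel = outside.length bounds the loop's remaining iterations; it never runs out)
def pvScanA (outside inside : List Char) (fuel k : Nat) : Bool :=
  match fuel with
  | 0 => false
  | fuel + 1 =>
    if k < outside.length - 2 then
      if outside.getD k ' ' == outside.getD (k+2) ' ' &&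
         outside.getD k ' ' != outside.getD (k+1) ' ' &&
         outside.getD (k+1) ' ' != '.' then
        if PySem.Chars.isIn [outside.getD (k+1) ' ', outside.getD k ' ', outside.getD (k+1) ' '] inside
        then true
        else pvScanA outside inside fuel (k+1)
      else pvScanA outside inside fuel (k+1)
    else false

def check_part2 (a : List String) : Bool :=
  let oi := (PySem.List.enumerate a).foldl
    (fun (s : List Char × List Char) je =>
      if PySem.Int.mod je.1 2 == 0 then (s.1 ++ '.' :: je.2.toList, s.2)
      else (s.1, s.2 ++ ',' :: je.2.toList)) ([], [])
  pvScanA oi.1 oi.2 oi.1.length 0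

-- ===== PORT B =====
def check_part2_alt (a : List String) : Bool :=
  let evens := (PySem.List.slice? a (some 0) none 2).getD []   -- a[0::2] (step ≠ 0: never none)
  let odds := (PySem.List.slice? a (some 1) none 2).getD []    -- a[1::2]
  let outside : List Char :=
    if evens.isEmpty then [] else '.' :: PySem.Chars.join ['.'] (evens.map String.toList)
  let inside : List Char :=
    if odds.isEmpty then [] else ',' :: PySem.Chars.join [','] (odds.map String.toList)
  -- set comprehensions over range(len(...)-2); indices are in range, so getD defaults never read
  let abas : PySem.Set (Char × Char) := PySem.Set.ofList
    (((List.range (outside.length - 2)).filter (fun i =>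
        outside.getD i ' ' == outside.getD (i+2) ' ' &&
        outside.getD i ' ' != outside.getD (i+1) ' ' &&
        outside.getD (i+1) ' ' != '.')).map
      (fun i => (outside.getD i ' ', outside.getD (i+1) ' ')))
  let babs : PySem.Set (Char × Char) := PySem.Set.ofList
    (((List.range (inside.length - 2)).filter (fun i =>
        inside.getD i ' ' == inside.getD (i+2) ' ')).map
      (fun i => (inside.getD (i+1) ' ', inside.getD i ' ')))
  !(PySem.Set.isdisjoint abas babs)

-- ===== PRECONDITION & SPEC =====
def Spec_check_part2 (a : List String) (out : Bool) : Prop := out = check_part2_alt a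
instance (a : List String) (out : Bool) : Decidable (Spec_check_part2 a out) := by unfold Spec_check_part2; infer_instance

-- ===== CLAIM (what is proved, stated in full; the proofs are below) =====
def Claim_equal_check_part2 : Prop := ∀ (a : List String), Dom_check_part2 a → Spec_check_part2 a (check_part2 a)

-- ===== LEMMAS AND PROOFS =====

def pvEvens {α : Type} : List α → List α
  | [] => []
  | [x] => [x]
  | x :: _ :: t => x :: pvEvens t
lemma pvEvens_cons {α : Type} (x : α) (t : List α) : pvEvens (x :: t) = x :: pvEvens t.tail := by
  cases t <;> rfl

lemma pvFM2 {α : Type} (xs : List α) :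
    List.filterMap (fun k : Nat => xs[((2:Int) * ↑k).toNat]?) (List.range ((xs.length + 1) / 2))
      = pvEvens xs := by
  fun_induction pvEvens xs with
  | case1 => simp
  | case2 x => simp [List.range_succ]
  | case3 x y t ih =>
    have hlen : ((x :: y :: t).length + 1) / 2 = (t.length + 1) / 2 + 1 := by
      simp; omega
    rw [hlen, List.range_succ_eq_map, List.filterMap_cons, List.filterMap_map]
    have hidx : ∀ k : Nat, ((2:Int) * ↑(k + 1)).toNat = 2 * k + 2 := by intro k; omega
    have hfun : (fun k : Nat => (x :: y :: t)[((2:Int) * ↑(k+1)).toNat]?)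
        = (fun k : Nat => t[((2:Int) * ↑k).toNat]?) := by
      funext k
      rw [hidx k]
      have : ((2:Int) * ↑k).toNat = 2 * k := by omega
      simp [this]
    simp only [Function.comp_def, hfun]
    simp [ih]

lemma pvSlice0 {α : Type} (xs : List α) :
    PySem.List.slice? xs (some 0) none 2 = some (pvEvens xs) := by
  simp only [PySem.List.slice?, PySem.List.sliceIndices]
  norm_num
  cases xs with
  | nil => simp [pvEvens]
  | cons x t =>
    rw [if_pos (by simp)]
    have : (((x :: t).length : Int) + 2 - 1) / 2 = (((x :: t).length + 1) / 2 : Nat) := by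
      push_cast
      omega
    rw [this, Int.toNat_natCast, pvFM2]

lemma pvSlice1 {α : Type} (xs : List α) :
    PySem.List.slice? xs (some 1) none 2 = some (pvEvens xs.tail) := by
  simp only [PySem.List.slice?, PySem.List.sliceIndices]
  norm_num
  cases xs with
  | nil => simp [pvEvens]
  | cons x t =>
    cases t with
    | nil => simp [pvEvens]
    | cons y u =>
      rw [if_pos (by simp)]
      have h1 : min 1 ((x :: y :: u).length : Int) = 1 := by simp; omega
      have h2 : (((x :: y :: u).length : Int) - min 1 ((x :: y :: u).length : Int) + 2 - 1) / 2
          = (((y :: u).length + 1) / 2 : Nat) := by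
        rw [h1]; simp only [List.length_cons]; push_cast; omega
      have hfun : (fun k : Nat => (x :: y :: u)[(min 1 ((x :: y :: u).length : Int) + 2 * ↑k).toNat]?)
          = (fun k : Nat => (y :: u)[((2:Int) * ↑k).toNat]?) := by
        funext k
        rw [h1]
        have e1 : ((1:Int) + 2 * ↑k).toNat = 2 * k + 1 := by omega
        have e2 : ((2:Int) * ↑k).toNat = 2 * k := by omega
        rw [e1, e2, Nat.add_comm (2*k) 1]
        rw [show 1 + 2 * k = (2*k) + 1 by omega]
        simp
      rw [hfun, h2, Int.toNat_natCast, pvFM2]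
      rfl

def pvWins (o : List Char) : List ((Char × Char) × Char) := (o.zip o.tail).zip o.tail.tail
lemma pvWins_length (o : List Char) : (pvWins o).length = o.length - 2 := by
  simp [pvWins, List.length_zip, List.length_tail]; omega
lemma pvWins_getElem (o : List Char) (k : Nat) (h : k < (pvWins o).length) :
    (pvWins o)[k] = ((o[k]'(by rw [pvWins_length] at h; omega),
                      o[k+1]'(by rw [pvWins_length] at h; omega)),
                      o[k+2]'(by rw [pvWins_length] at h; omega)) := by
  have h2 : k < o.length - 2 := by rw [pvWins_length] at h; exact h
  simp [pvWins, List.getElem_zip, List.getElem_tail]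
lemma pvInfix_iff_window (t s : List Char) (ht : t.length = 3) :
    t <:+: s ↔ ∃ i, i < s.length - 2 ∧ (s.drop i).take 3 = t := by
  constructor
  · rintro ⟨p, q, rfl⟩
    refine ⟨p.length, by simp; omega, ?_⟩
    rw [List.append_assoc, List.drop_left, List.take_left' ht]
  · rintro ⟨i, hi, rfl⟩
    refine ⟨s.take i, (s.drop i).drop 3, ?_⟩
    rw [List.append_assoc, List.take_append_drop, List.take_append_drop]
lemma pvWindow_eq (s : List Char) (i : Nat) (h : i + 2 < s.length) :
    (s.drop i).take 3 = [s[i]'(by omega), s[i+1]'(by omega), s[i+2]'(by omega)] := by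
  rw [List.drop_eq_getElem_cons (by omega), List.take_succ_cons,
      show s.drop (i+1) = s[i+1] :: s.drop (i+2) from List.drop_eq_getElem_cons (by omega),
      List.take_succ_cons,
      show s.drop (i+2) = s[i+2] :: s.drop (i+3) from List.drop_eq_getElem_cons (by omega),
      List.take_succ_cons, List.take_zero]

lemma pvGetD (o : List Char) (i : Nat) (h : i < o.length) : o.getD i ' ' = o[i] := by
  simp [List.getD, List.getElem?_eq_getElem h]

lemma pvMain (o s : List Char) :
    (pvWins o).any (fun p =>
      p.1.1 == p.2 && p.1.1 != p.1.2 && p.1.2 != '.' &&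
        PySem.Chars.isIn [p.1.2, p.1.1, p.1.2] s)
    = !(PySem.Set.isdisjoint
        (PySem.Set.ofList (((List.range (o.length - 2)).filter (fun i =>
            o.getD i ' ' == o.getD (i+2) ' ' && o.getD i ' ' != o.getD (i+1) ' ' &&
            o.getD (i+1) ' ' != '.')).map (fun i => (o.getD i ' ', o.getD (i+1) ' '))))
        (PySem.Set.ofList (((List.range (s.length - 2)).filter (fun i =>
            s.getD i ' ' == s.getD (i+2) ' ')).map
          (fun i => (s.getD (i+1) ' ', s.getD i ' '))))) := by
  rw [Bool.eq_iff_iff, List.any_eq_true, Bool.not_eq_true', ← Bool.not_eq_true,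
      PySem.Set.isdisjoint_iff]
  push Not
  constructor
  · rintro ⟨p, hmem, hp⟩
    obtain ⟨k, hk, rfl⟩ := List.mem_iff_getElem.mp hmem
    rw [pvWins_getElem o k hk] at hp
    have hk2 : k < o.length - 2 := by rw [pvWins_length] at hk; exact hk
    have h0 : k < o.length := by omega
    have h1 : k + 1 < o.length := by omega
    have h2 : k + 2 < o.length := by omega
    simp only [Bool.and_eq_true, beq_iff_eq, bne_iff_ne, ne_eq] at hp
    obtain ⟨⟨⟨haz, hab⟩, hbd⟩, hin⟩ := hp
    rw [PySem.Chars.isIn_iff_infix, pvInfix_iff_window _ _ rfl] at hin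
    obtain ⟨i, hi, hwin⟩ := hin
    have hi2 : i + 2 < s.length := by omega
    rw [pvWindow_eq s i hi2] at hwin
    have e0 : s[i]'(by omega) = o[k+1]'h1 := by injection hwin
    have e1 : s[i+1]'(by omega) = o[k]'h0 := by
      injection hwin with _ hw; injection hw
    have e2 : s[i+2]'(by omega) = o[k+1]'h1 := by
      injection hwin with _ hw; injection hw with _ hw2; injection hw2
    refine ⟨(o[k]'h0, o[k+1]'h1), ?_, ?_⟩
    · rw [PySem.Set.mem_ofList]
      refine List.mem_map.mpr ⟨k, List.mem_filter.mpr ⟨List.mem_range.mpr hk2, ?_⟩, ?_⟩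
      · rw [pvGetD o k h0, pvGetD o (k+1) h1, pvGetD o (k+2) h2]
        simp only [Bool.and_eq_true, beq_iff_eq, bne_iff_ne, ne_eq]
        exact ⟨⟨haz, hab⟩, hbd⟩
      · rw [pvGetD o k h0, pvGetD o (k+1) h1]
    · rw [PySem.Set.mem_ofList]
      refine List.mem_map.mpr ⟨i, List.mem_filter.mpr ⟨List.mem_range.mpr hi, ?_⟩, ?_⟩
      · rw [pvGetD s i (by omega), pvGetD s (i+2) (by omega)]
        simp [e0, e2]
      · rw [pvGetD s i (by omega), pvGetD s (i+1) (by omega), e0, e1]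
  · rintro ⟨p, ha, hb⟩
    rw [PySem.Set.mem_ofList] at ha hb
    obtain ⟨k, hkf, hkp⟩ := List.mem_map.mp ha
    obtain ⟨i, hif, hip⟩ := List.mem_map.mp hb
    obtain ⟨hkr, hkc⟩ := List.mem_filter.mp hkf
    obtain ⟨hir, hic⟩ := List.mem_filter.mp hif
    have hk2 := List.mem_range.mp hkr
    have hi2 := List.mem_range.mp hir
    have h0 : k < o.length := by omega
    have h1 : k + 1 < o.length := by omega
    have h2 : k + 2 < o.length := by omega
    have g0 : i < s.length := by omega
    have g1 : i + 1 < s.length := by omega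
    have g2 : i + 2 < s.length := by omega
    rw [pvGetD o k h0, pvGetD o (k+1) h1, pvGetD o (k+2) h2] at hkc
    rw [pvGetD o k h0, pvGetD o (k+1) h1] at hkp
    rw [pvGetD s i g0, pvGetD s (i+2) g2] at hic
    rw [pvGetD s i g0, pvGetD s (i+1) g1] at hip
    simp only [Bool.and_eq_true, beq_iff_eq, bne_iff_ne, ne_eq] at hkc hic
    have hsx : s[i+1] = o[k] := congrArg Prod.fst (hip.trans hkp.symm)
    have hsy : s[i] = o[k+1] := congrArg Prod.snd (hip.trans hkp.symm)
    refine ⟨(pvWins o)[k]'(by rw [pvWins_length]; omega), List.getElem_mem _, ?_⟩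
    rw [pvWins_getElem o k (by rw [pvWins_length]; omega)]
    simp only [Bool.and_eq_true, beq_iff_eq, bne_iff_ne, ne_eq]
    refine ⟨⟨⟨hkc.1.1, hkc.1.2⟩, hkc.2⟩, ?_⟩
    rw [PySem.Chars.isIn_iff_infix, pvInfix_iff_window _ _ rfl]
    refine ⟨i, hi2, ?_⟩
    rw [pvWindow_eq s i g2, hsy, hsx, ← hic, hsy]

lemma pvJoin_eq (c : Char) (l : List String) :
    l.flatMap (fun s => c :: s.toList) =
      if l.isEmpty then [] else c :: PySem.Chars.join [c] (l.map String.toList) := by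
  induction l with
  | nil => rfl
  | cons x t ih =>
    cases t with
    | nil => simp [PySem.Chars.join_singleton]
    | cons y u =>
      simp only [List.flatMap_cons] at ih ⊢
      rw [ih]
      simp [PySem.Chars.join_cons_cons]

lemma pvEnum_parity {α : Type} (l : List α) : ∀ s : Int,
    ((PySem.List.enumerate l s).filter (fun p => PySem.Int.mod p.1 2 == PySem.Int.mod s 2)).map Prod.snd
      = pvEvens l ∧
    ((PySem.List.enumerate l s).filter (fun p => PySem.Int.mod p.1 2 != PySem.Int.mod s 2)).map Prod.snd
      = pvEvens l.tail := by
  induction l with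
  | nil => intro s; constructor <;> rfl
  | cons x t ih =>
    intro s
    have hm : ∀ a : Int, PySem.Int.mod a 2 = a % 2 :=
      fun a => PySem.Int.mod_eq_emod_of_pos (by omega)
    have hsw : ∀ j : Int, (PySem.Int.mod j 2 == PySem.Int.mod s 2)
        = (PySem.Int.mod j 2 != PySem.Int.mod (s+1) 2) := by
      intro j
      rw [hm j, hm s, hm (s+1)]
      rcases Int.emod_two_eq_zero_or_one j with h | h <;>
        rcases Int.emod_two_eq_zero_or_one s with h' | h' <;>
          simp [h, h'] <;> omega
    have he : PySem.List.enumerate (x :: t) s = (s, x) :: PySem.List.enumerate t (s+1) := rfl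
    constructor
    · rw [he, List.filter_cons]
      rw [if_pos (by simp)]
      rw [List.filter_congr (fun p _ => (hsw p.1)), List.map_cons, (ih (s+1)).2, pvEvens_cons]
    · rw [he, List.filter_cons]
      rw [if_neg (by simp [bne])]
      have hsw2 : ∀ j : Int, (PySem.Int.mod j 2 != PySem.Int.mod s 2)
          = (PySem.Int.mod j 2 == PySem.Int.mod (s+1) 2) := by
        intro j
        rw [bne, hsw j, bne]
        simp
      rw [List.filter_congr (fun p _ => hsw2 p.1)]
      rw [(ih (s+1)).1]
      rfl

-- A's scan from k is the any-scan over the windows from k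
lemma pvScanA_eq_any_aux (o i : List Char) : ∀ fuel k, o.length - 2 - k ≤ fuel →
    pvScanA o i fuel k = ((pvWins o).drop k).any (fun p =>
      p.1.1 == p.2 && p.1.1 != p.1.2 && p.1.2 != '.' &&
        PySem.Chars.isIn [p.1.2, p.1.1, p.1.2] i) := by
  intro fuel
  induction fuel with
  | zero =>
    intro k hk
    rw [pvScanA, List.drop_eq_nil_of_le (by rw [pvWins_length]; omega)]
    simp
  | succ m ih =>
    intro k hk
    by_cases hk' : k < o.length - 2
    case neg =>
      rw [pvScanA, if_neg hk',
        List.drop_eq_nil_of_le (by rw [pvWins_length]; omega)]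
      simp
    have hW : k < (pvWins o).length := by rw [pvWins_length]; omega
    have h0 : k < o.length := by omega
    have h1 : k + 1 < o.length := by omega
    have h2 : k + 2 < o.length := by omega
    have e0 : o.getD k ' ' = o[k]'h0 := by simp [List.getD, List.getElem?_eq_getElem h0]
    have e1 : o.getD (k+1) ' ' = o[k+1]'h1 := by simp [List.getD, List.getElem?_eq_getElem h1]
    have e2 : o.getD (k+2) ' ' = o[k+2]'h2 := by simp [List.getD, List.getElem?_eq_getElem h2]
    rw [pvScanA, if_pos hk', e0, e1, e2,
      List.drop_eq_getElem_cons hW, List.any_cons, pvWins_getElem o k hW,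
      ih (k+1) (by omega)]
    cases ha : (o[k]'h0 == o[k+2]'h2) <;>
      cases hb : (o[k]'h0 != o[k+1]'h1) <;>
        cases hc : (o[k+1]'h1 != '.') <;>
          cases hd : PySem.Chars.isIn [o[k+1]'h1, o[k]'h0, o[k+1]'h1] i <;>
            simp

-- A's accumulator fold builds exactly the parity-filtered flatMaps
lemma pvBuild_eq (l : List (Int × String)) :
    l.foldl (fun (s : List Char × List Char) je =>
      if PySem.Int.mod je.1 2 == 0 then (s.1 ++ '.' :: je.2.toList, s.2)
      else (s.1, s.2 ++ ',' :: je.2.toList)) ([], []) =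
    ((l.filter (fun p => PySem.Int.mod p.1 2 == 0)).flatMap (fun p => '.' :: p.2.toList),
     (l.filter (fun p => PySem.Int.mod p.1 2 == 1)).flatMap (fun p => ',' :: p.2.toList)) := by
  have hmod : ∀ j : Int, (PySem.Int.mod j 2 == 1) = !(PySem.Int.mod j 2 == 0) := by
    intro j
    have h1 := PySem.Int.mod_nonneg j (b := 2) (by omega)
    have h2 := PySem.Int.mod_lt j (b := 2) (by omega)
    interval_cases h : PySem.Int.mod j 2 <;> rfl
  have hf : (fun (s : List Char × List Char) (je : Int × String) =>
      if PySem.Int.mod je.1 2 == 0 then (s.1 ++ '.' :: je.2.toList, s.2)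
      else (s.1, s.2 ++ ',' :: je.2.toList)) =
      (fun s je => ((fun (acc : List Char) (je : Int × String) =>
          if PySem.Int.mod je.1 2 == 0 then acc ++ '.' :: je.2.toList else acc) s.1 je,
        (fun (acc : List Char) (je : Int × String) =>
          if PySem.Int.mod je.1 2 == 1 then acc ++ ',' :: je.2.toList else acc) s.2 je)) := by
    funext s je
    by_cases h : (PySem.Int.mod je.1 2 == 0) = true
    · simp only [h, hmod, if_true, Bool.not_true, Bool.false_eq_true, if_false]
    · simp only [Bool.not_eq_true] at h
      simp only [h, hmod, Bool.not_false, if_true, Bool.false_eq_true, if_false]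
  rw [hf, PySem.List.foldl_prod_mk
        (f := fun (acc : List Char) (je : Int × String) =>
          if PySem.Int.mod je.1 2 == 0 then acc ++ '.' :: je.2.toList else acc)
        (g := fun (acc : List Char) (je : Int × String) =>
          if PySem.Int.mod je.1 2 == 1 then acc ++ ',' :: je.2.toList else acc)]
  rw [PySem.List.foldl_if_eq_foldl_filter (p := fun p : Int × String => PySem.Int.mod p.1 2 == 0)
        (f := fun acc p => acc ++ '.' :: p.2.toList),
      PySem.List.foldl_if_eq_foldl_filter (p := fun p : Int × String => PySem.Int.mod p.1 2 == 1)
        (f := fun acc p => acc ++ ',' :: p.2.toList),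
      PySem.List.foldl_append_eq_flatMap, PySem.List.foldl_append_eq_flatMap]
  simp

lemma pvModOne (j : Int) :
    (PySem.Int.mod j 2 == 1) = (PySem.Int.mod j 2 != PySem.Int.mod 0 2) := by
  rw [show PySem.Int.mod (0:Int) 2 = 0 from rfl,
      PySem.Int.mod_eq_emod_of_pos (a := j) (by omega)]
  rcases Int.emod_two_eq_zero_or_one j with h | h <;> simp [h]

-- ===== VERDICT (by name: the statement is the Claim_ definition above) =====
theorem check_part2_spec : Claim_equal_check_part2 := by
  intro a _
  unfold Spec_check_part2
  simp only [check_part2, check_part2_alt]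
  rw [pvBuild_eq, pvSlice0, pvSlice1]
  simp only [Option.getD_some]
  have hev : ((PySem.List.enumerate a).filter
      (fun p => PySem.Int.mod p.1 2 == 0)).map Prod.snd = pvEvens a := by
    have h := (pvEnum_parity a 0).1
    simpa using h
  have hod : ((PySem.List.enumerate a).filter
      (fun p => PySem.Int.mod p.1 2 == 1)).map Prod.snd = pvEvens a.tail := by
    have h := (pvEnum_parity a 0).2
    rw [List.filter_congr (fun p _ => pvModOne p.1)]
    exact h
  have hO : ((PySem.List.enumerate a).filter
        (fun p => PySem.Int.mod p.1 2 == 0)).flatMap (fun p => '.' :: p.2.toList)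
      = if (pvEvens a).isEmpty then []
        else '.' :: PySem.Chars.join ['.'] ((pvEvens a).map String.toList) := by
    rw [← pvJoin_eq, ← hev]
    simp [List.flatMap_map]
  have hI : ((PySem.List.enumerate a).filter
        (fun p => PySem.Int.mod p.1 2 == 1)).flatMap (fun p => ',' :: p.2.toList)
      = if (pvEvens a.tail).isEmpty then []
        else ',' :: PySem.Chars.join [','] ((pvEvens a.tail).map String.toList) := by
    rw [← pvJoin_eq, ← hod]
    simp [List.flatMap_map]
  rw [hO, hI, pvScanA_eq_any_aux _ _ _ 0 (by omega), List.drop_zero, pvMain]
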